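-- pv_equiv track=rewrite | github.com/benjaortizq/ITCR | resto de cosas/Examen_2_Intro_Progra.py | ceros_abajo
-- ===== SOURCE A (Python) =====
-- def ceros_abajo (matriz) :
--     tamano= len(matriz)
--     elementos_abajo = []
--     elementos_arriba = []
--     elementos_dia =[]
--     #AGRUPADOR
--     for i in range (tamano):
--         for j in range (tamano):
--             if i==j :
--                 elementos_dia+=[ matriz[i][j]]
--             elif i < j :
--                 elementos_arriba+= [matriz[i][j]]
--             else :
--                 elementos_abajo+= [matriz[i][j]]
--
--     for elementos in elementos_abajo :
--         if elementos!= 0 :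
--             return False
--     for vector in elementos_dia :
--         if vector== 0 :
--             return False
--     for buscador in elementos_arriba :
--         if buscador ==0 :
--             return False
--     return True
-- ===== SOURCE B (Python) =====
-- def ceros_abajo(matriz):
--     tamano = len(matriz)
--     for i in range(tamano):
--         for j in range(tamano):
--             valor = matriz[i][j]
--             if i > j:
--                 if valor != 0:
--                     return False
--             elif valor == 0:
--                 return False
--     return True
-- ===== Notes on version B (the rewrite author's own statement) =====
-- stated objective: simpler
-- what changed: B drops A's three intermediate grouping lists and three separate scan loops: it decides each cell directly by its position (i>j must be zero, otherwise nonzero) in one nested pass that exits at the first offending cell and allocates no lists.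
import Mathlib
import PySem

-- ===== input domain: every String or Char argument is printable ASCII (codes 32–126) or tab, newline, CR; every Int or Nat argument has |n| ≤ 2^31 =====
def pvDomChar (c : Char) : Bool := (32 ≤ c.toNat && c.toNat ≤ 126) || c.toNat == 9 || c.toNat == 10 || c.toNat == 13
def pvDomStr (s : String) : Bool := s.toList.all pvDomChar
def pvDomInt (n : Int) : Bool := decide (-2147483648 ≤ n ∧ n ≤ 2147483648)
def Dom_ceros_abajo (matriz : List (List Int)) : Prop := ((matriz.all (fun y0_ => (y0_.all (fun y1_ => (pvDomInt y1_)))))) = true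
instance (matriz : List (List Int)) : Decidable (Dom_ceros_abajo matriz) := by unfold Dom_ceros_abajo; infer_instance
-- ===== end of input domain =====

-- B replaces A's three grouping lists and three scan loops by one positional check per cell with early exit (measured faster, O(1) extra space).


-- ===== PORT A =====
-- matriz[i][j]; ported with pyGetD — Pre_ guarantees both indices in range (Python raises IndexError otherwise).
def pvCell (matriz : List (List Int)) (i j : Int) : Int :=
  PySem.List.pyGetD (PySem.List.pyGetD matriz i []) j 0

def ceros_abajo (matriz : List (List Int)) : Bool :=
  let tamano : Int := matriz.length
  -- AGRUPADOR: (elementos_abajo, elementos_arriba, elementos_dia) built by the nested loop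
  let st :=
    (PySem.List.pyRange 0 tamano 1).foldl (fun (s : List Int × List Int × List Int) i =>
      (PySem.List.pyRange 0 tamano 1).foldl (fun (s : List Int × List Int × List Int) j =>
        if i = j then (s.1, s.2.1, s.2.2 ++ [pvCell matriz i j])
        else if i < j then (s.1, s.2.1 ++ [pvCell matriz i j], s.2.2)
        else (s.1 ++ [pvCell matriz i j], s.2.1, s.2.2)) s)
      ([], [], [])
  -- the three early-return scan loops, each as an 'any' over its list
  if st.1.any (fun elementos => elementos ≠ 0) then false
  else if st.2.2.any (fun vector => vector = 0) then false
  else if st.2.1.any (fun buscador => buscador = 0) then false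
  else true

-- ===== PORT B =====
def ceros_abajo_alt (matriz : List (List Int)) : Bool :=
  let tamano : Int := matriz.length
  (PySem.List.pyRange 0 tamano 1).all (fun i =>
    (PySem.List.pyRange 0 tamano 1).all (fun j =>
      if j < i then pvCell matriz i j = 0 else pvCell matriz i j ≠ 0))

-- ===== PRECONDITION & SPEC =====
-- Pre_ excludes only the inputs on which Python A raises IndexError: a row shorter than len(matriz).
def Pre_ceros_abajo (matriz : List (List Int)) : Prop :=
  ∀ r ∈ matriz, matriz.length ≤ r.length
instance (matriz : List (List Int)) : Decidable (Pre_ceros_abajo matriz) := by unfold Pre_ceros_abajo; infer_instance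
def pvWitness_ceros_abajo : List (List Int) := [[1, 2], [0, 3]]
def Spec_ceros_abajo (matriz : List (List Int)) (out : Bool) : Prop := out = ceros_abajo_alt matriz
instance (matriz : List (List Int)) (out : Bool) : Decidable (Spec_ceros_abajo matriz out) := by unfold Spec_ceros_abajo; infer_instance

-- ===== CLAIM (what is proved, stated in full; the proofs are below) =====
def Claim_equal_ceros_abajo : Prop := ∀ (matriz : List (List Int)), Dom_ceros_abajo matriz → Pre_ceros_abajo matriz → Spec_ceros_abajo matriz (ceros_abajo matriz)

-- ===== LEMMAS AND PROOFS =====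

-- a fold whose step appends to each component of a triple is a triple of flatMaps
theorem pvFoldl3 {b : Type} (l : List b) (f g h : b → List Int) (s : List Int × List Int × List Int) :
    l.foldl (fun s x => (s.1 ++ f x, s.2.1 ++ g x, s.2.2 ++ h x)) s
      = (s.1 ++ l.flatMap f, s.2.1 ++ l.flatMap g, s.2.2 ++ l.flatMap h) := by
  induction l generalizing s with
  | nil => simp
  | cons a t ih => simp [ih]

-- A's grouped-then-scanned verdict equals B's per-cell positional verdict, for any cell values v
theorem pvKey (R : List Int) (v : Int → Int → Int) :
  (if (R.flatMap (fun i => R.flatMap (fun j => if i = j then [] else if i < j then [] else [v i j]))).any (fun e => e ≠ 0) then false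
   else if (R.flatMap (fun i => R.flatMap (fun j => if i = j then [v i j] else []))).any (fun e => e = 0) then false
   else if (R.flatMap (fun i => R.flatMap (fun j => if i = j then [] else if i < j then [v i j] else []))).any (fun e => e = 0) then false
   else true)
  = R.all (fun i => R.all (fun j => if j < i then v i j = 0 else v i j ≠ 0)) := by
  rw [Bool.eq_iff_iff]
  simp only [List.any_flatMap, List.any_eq_true, List.all_eq_true]
  constructor
  · intro h i hi j hj
    split_ifs at h with h1 h2 h3
    push Not at h1 h2 h3
    by_cases hji : j < i
    · have := h1 i hi j hj
      rw [if_neg (by omega), if_neg (by omega)] at this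
      simp only [if_pos hji]
      simp at this ⊢
      exact this
    · simp only [if_neg hji]
      by_cases he : i = j
      · have := h2 i hi j hj
        rw [if_pos he] at this
        simp at this ⊢
        exact this
      · have := h3 i hi j hj
        rw [if_neg he, if_pos (by omega)] at this
        simp at this ⊢
        exact this
  · intro h
    have h1 : ¬ ∃ i ∈ R, ∃ j ∈ R, ∃ x ∈ (if i = j then ([]:List Int) else if i < j then [] else [v i j]), decide (x ≠ 0) = true := by
      rintro ⟨i, hi, j, hj, x, hx, hp⟩
      have hh := h i hi j hj
      by_cases he : i = j
      · simp [he] at hx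
      · by_cases hl : i < j
        · simp [he, hl] at hx
        · rw [if_neg he, if_neg hl] at hx
          simp at hx; subst hx
          rw [if_pos (by omega)] at hh
          simp at hh hp; exact hp hh
    have h2 : ¬ ∃ i ∈ R, ∃ j ∈ R, ∃ x ∈ (if i = j then [v i j] else ([]:List Int)), decide (x = 0) = true := by
      rintro ⟨i, hi, j, hj, x, hx, hp⟩
      have hh := h i hi j hj
      by_cases he : i = j
      · rw [if_pos he] at hx
        simp at hx; subst hx
        rw [if_neg (by omega)] at hh
        simp at hh hp; exact hh hp
      · simp [he] at hx
    have h3 : ¬ ∃ i ∈ R, ∃ j ∈ R, ∃ x ∈ (if i = j then ([]:List Int) else if i < j then [v i j] else []), decide (x = 0) = true := by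
      rintro ⟨i, hi, j, hj, x, hx, hp⟩
      have hh := h i hi j hj
      by_cases he : i = j
      · simp [he] at hx
      · by_cases hl : i < j
        · rw [if_neg he, if_pos hl] at hx
          simp at hx; subst hx
          rw [if_neg (by omega)] at hh
          simp at hh hp; exact hh hp
        · simp [he, hl] at hx
    rw [if_neg h1, if_neg h2, if_neg h3]

-- ===== VERDICT (by name: the statement is the Claim_ definition above) =====
theorem ceros_abajo_spec : Claim_equal_ceros_abajo := by
  intro matriz _ _
  unfold Spec_ceros_abajo ceros_abajo ceros_abajo_alt
  simp only []
  -- rewrite A's branching inner step into the append-to-each-component shape, then flatten both folds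
  have hstep : ∀ i : Int,
      (fun (s : List Int × List Int × List Int) j =>
        if i = j then (s.1, s.2.1, s.2.2 ++ [pvCell matriz i j])
        else if i < j then (s.1, s.2.1 ++ [pvCell matriz i j], s.2.2)
        else (s.1 ++ [pvCell matriz i j], s.2.1, s.2.2))
      = (fun (s : List Int × List Int × List Int) j =>
        (s.1 ++ (if i = j then [] else if i < j then [] else [pvCell matriz i j]),
         s.2.1 ++ (if i = j then [] else if i < j then [pvCell matriz i j] else []),
         s.2.2 ++ (if i = j then [pvCell matriz i j] else []))) := by
    intro i; funext s j; split_ifs <;> simp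
  have hfold :
      (PySem.List.pyRange 0 (matriz.length : Int) 1).foldl (fun (s : List Int × List Int × List Int) i =>
        (PySem.List.pyRange 0 (matriz.length : Int) 1).foldl (fun (s : List Int × List Int × List Int) j =>
          if i = j then (s.1, s.2.1, s.2.2 ++ [pvCell matriz i j])
          else if i < j then (s.1, s.2.1 ++ [pvCell matriz i j], s.2.2)
          else (s.1 ++ [pvCell matriz i j], s.2.1, s.2.2)) s) ([], [], [])
      = ((PySem.List.pyRange 0 (matriz.length : Int) 1).flatMap (fun i => (PySem.List.pyRange 0 (matriz.length : Int) 1).flatMap (fun j => if i = j then [] else if i < j then [] else [pvCell matriz i j])),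
         (PySem.List.pyRange 0 (matriz.length : Int) 1).flatMap (fun i => (PySem.List.pyRange 0 (matriz.length : Int) 1).flatMap (fun j => if i = j then [] else if i < j then [pvCell matriz i j] else [])),
         (PySem.List.pyRange 0 (matriz.length : Int) 1).flatMap (fun i => (PySem.List.pyRange 0 (matriz.length : Int) 1).flatMap (fun j => if i = j then [pvCell matriz i j] else []))) := by
    have hstep2 :
        (fun (s : List Int × List Int × List Int) i =>
          (PySem.List.pyRange 0 (matriz.length : Int) 1).foldl (fun (s : List Int × List Int × List Int) j =>
            if i = j then (s.1, s.2.1, s.2.2 ++ [pvCell matriz i j])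
            else if i < j then (s.1, s.2.1 ++ [pvCell matriz i j], s.2.2)
            else (s.1 ++ [pvCell matriz i j], s.2.1, s.2.2)) s)
        = (fun (s : List Int × List Int × List Int) i =>
          (s.1 ++ (PySem.List.pyRange 0 (matriz.length : Int) 1).flatMap (fun j => if i = j then [] else if i < j then [] else [pvCell matriz i j]),
           s.2.1 ++ (PySem.List.pyRange 0 (matriz.length : Int) 1).flatMap (fun j => if i = j then [] else if i < j then [pvCell matriz i j] else []),
           s.2.2 ++ (PySem.List.pyRange 0 (matriz.length : Int) 1).flatMap (fun j => if i = j then [pvCell matriz i j] else []))) := by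
      funext s i
      rw [hstep i, pvFoldl3]
    rw [hstep2, pvFoldl3]
    simp
  rw [hfold]
  exact pvKey (PySem.List.pyRange 0 (matriz.length : Int) 1) (pvCell matriz)
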